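-- pv_equiv track=rewrite | github.com/ChloeLidec/ChloeLidecProjects | cyber_attack_at_iuto/source/matrice.py | max_matrice
-- ===== SOURCE A (Python) =====
-- def get_nb_lignes(matrice):
--     """retourne le nombre de lignes de la matrice
--
--     Args:
--         matrice (dict): une matrice
--
--     Returns:
--         int: le nombre de lignes de la matrice
--     """
--     return len(matrice)
--
-- def get_nb_colonnes(matrice):
--     """retourne le nombre de colonnes de la matrice
--
--     Args:
--         matrice (dict): une matrice
--
--     Returns:
--         int: le nombre de colonnes de la matrice
--     """
--     return len(matrice[0])
--
-- def get_val(matrice, lig, col):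
--     """retourne la valeur en lig, col de la matrice
--
--     Args:
--         matrice (dict): une matrice
--         lig (int): numéro de la ligne (en commençant par 0)
--         col (int): numéro de la colonne (en commençant par 0)
--
--     Returns:
--         Any: la valeur en lig, col de la matrice
--     """
--     return matrice[lig][col]
--
-- def max_matrice(matrice, interdits=None):
--     """retourne la liste des coordonnées des cases contenant la valeur la plus grande de la matrice
--         Ces case ne doivent pas être parmi les interdits.
--
--     Args:
--         matrice (dict): une matrice
--         interdits (set): un ensemble de tuples (ligne,colonne) de case interdites. Defaults to None
--
--     Returns:
--         list: la liste des coordonnées de cases de valeur maximale dans la matrice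
--         (hors cases interdites)
--     """
--     val_max = None
--     liste_coord = []
--     for ligne in range(get_nb_lignes(matrice)):
--         for colonne in range(get_nb_colonnes(matrice)):
--             if val_max is None or get_val(matrice, ligne, colonne) > val_max:
--                 if interdits is None or (ligne, colonne) not in interdits:
--                     val_max = get_val(matrice, ligne, colonne)
--                     liste_coord = [(ligne, colonne)]
--             elif get_val(matrice, ligne, colonne) == val_max:
--                 if interdits is None or (ligne, colonne) not in interdits:
--                     liste_coord.append((ligne, colonne))
--     return liste_coord
-- ===== SOURCE B (Python) =====
-- def max_matrice(matrice, interdits=None):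
--     coords = [(i, j) for i in range(len(matrice)) for j in range(len(matrice[0]))
--               if interdits is None or (i, j) not in interdits]
--     if not coords:
--         return []
--     val_max = max(matrice[i][j] for i, j in coords)
--     return [(i, j) for (i, j) in coords if matrice[i][j] == val_max]
-- ===== Notes on version B (the rewrite author's own statement) =====
-- stated objective: simpler
-- what changed: Replaces A's single stateful scan with a running max and a coordinate list that is reset/extended cell by cell, by a plain decomposition: build the list of allowed coordinates, take the max of their values, then filter the coordinates whose value equals that max.
import Mathlib
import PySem

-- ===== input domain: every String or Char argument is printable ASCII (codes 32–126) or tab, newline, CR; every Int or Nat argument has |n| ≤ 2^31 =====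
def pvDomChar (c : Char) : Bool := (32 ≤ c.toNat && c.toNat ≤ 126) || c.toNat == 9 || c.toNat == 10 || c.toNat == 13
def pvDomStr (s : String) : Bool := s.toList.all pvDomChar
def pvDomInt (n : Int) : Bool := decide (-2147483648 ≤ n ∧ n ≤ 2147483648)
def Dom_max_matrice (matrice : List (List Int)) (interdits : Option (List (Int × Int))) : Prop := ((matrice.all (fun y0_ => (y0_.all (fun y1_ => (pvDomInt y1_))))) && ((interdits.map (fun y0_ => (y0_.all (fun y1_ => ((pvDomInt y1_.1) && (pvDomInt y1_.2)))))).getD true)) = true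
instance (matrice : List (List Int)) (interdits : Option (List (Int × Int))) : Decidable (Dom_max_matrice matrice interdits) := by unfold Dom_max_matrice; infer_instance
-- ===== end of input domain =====

-- B replaces A's single stateful scan (running max + coordinate list rebuilt/reset on the fly)
-- by a plain decomposition: build the allowed coordinates, take the max of their values, filter.
-- Objective: simpler; equivalence proved on Pre_ (no row shorter than row 0, where A raises).

-- ===== PORT A =====
-- helpers of the module, ported literally
def get_nb_lignes (matrice : List (List Int)) : Int := matrice.length
def get_nb_colonnes (matrice : List (List Int)) : Int := (PySem.List.pyGetD matrice 0 []).length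
def get_val (matrice : List (List Int)) (lig col : Int) : Int :=
  PySem.List.pyGetD (PySem.List.pyGetD matrice lig []) col 0

def max_matrice (matrice : List (List Int)) (interdits : Option (List (Int × Int))) : List (Int × Int) :=
  let st :=
    (PySem.List.pyRange 0 (get_nb_lignes matrice) 1).foldl (fun st ligne =>
      (PySem.List.pyRange 0 (get_nb_colonnes matrice) 1).foldl (fun st colonne =>
        let (val_max, liste_coord) := st
        match val_max with
        | none =>  -- 'val_max is None or …' : first disjunct
          if (match interdits with | none => true | some s => !(s.contains (ligne, colonne))) then
            (some (get_val matrice ligne colonne), [(ligne, colonne)])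
          else st
        | some m =>
          if m < get_val matrice ligne colonne then
            if (match interdits with | none => true | some s => !(s.contains (ligne, colonne))) then
              (some (get_val matrice ligne colonne), [(ligne, colonne)])
            else st
          else if get_val matrice ligne colonne = m then
            if (match interdits with | none => true | some s => !(s.contains (ligne, colonne))) then
              (val_max, liste_coord ++ [(ligne, colonne)])
            else st
          else st) st)
      ((none : Option Int), ([] : List (Int × Int)))
  st.2

-- ===== PORT B =====
def max_matrice_alt (matrice : List (List Int)) (interdits : Option (List (Int × Int))) : List (Int × Int) :=
  let coords :=
    (PySem.List.pyRange 0 (matrice.length : Int) 1).flatMap (fun i =>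
      ((PySem.List.pyRange 0 ((PySem.List.pyGetD matrice 0 []).length : Int) 1).map (fun j => (i, j))).filter
        (fun c => match interdits with | none => true | some s => !(s.contains c)))
  match coords with
  | [] => []
  | c :: cs =>
    let val_max := cs.foldl
      (fun acc d => max acc (PySem.List.pyGetD (PySem.List.pyGetD matrice d.1 []) d.2 0))
      (PySem.List.pyGetD (PySem.List.pyGetD matrice c.1 []) c.2 0)
    (c :: cs).filter
      (fun d => PySem.List.pyGetD (PySem.List.pyGetD matrice d.1 []) d.2 0 == val_max)

-- ===== PRECONDITION & SPEC =====
-- Pre_ excludes exactly the inputs where Python A raises IndexError: a row shorter than row 0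
-- (A reads column indices 0 .. len(matrice[0])-1 in every row).
def Pre_max_matrice (matrice : List (List Int)) (interdits : Option (List (Int × Int))) : Prop :=
  ∀ row ∈ matrice, (matrice.headD []).length ≤ row.length
instance (matrice : List (List Int)) (interdits : Option (List (Int × Int))) : Decidable (Pre_max_matrice matrice interdits) := by unfold Pre_max_matrice; infer_instance

def pvWitness_max_matrice : List (List Int) × (Option (List (Int × Int))) :=
  ([[1, 2], [3, 3]], some [(0, 1)])

def Spec_max_matrice (matrice : List (List Int)) (interdits : Option (List (Int × Int))) (out : List (Int × Int)) : Prop := out = max_matrice_alt matrice interdits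
instance (matrice : List (List Int)) (interdits : Option (List (Int × Int))) (out : List (Int × Int)) : Decidable (Spec_max_matrice matrice interdits out) := by unfold Spec_max_matrice; infer_instance

-- ===== CLAIM (what is proved, stated in full; the proofs are below) =====
def Claim_equal_max_matrice : Prop := ∀ (matrice : List (List Int)) (interdits : Option (List (Int × Int))), Dom_max_matrice matrice interdits → Pre_max_matrice matrice interdits → Spec_max_matrice matrice interdits (max_matrice matrice interdits)

-- ===== LEMMAS AND PROOFS =====

-- proof-side helpers (below the claim block; used only by the proofs)

def pvAllow (interdits : Option (List (Int × Int))) (c : Int × Int) : Bool :=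
  match interdits with | none => true | some s => !(s.contains c)

def pvCells (matrice : List (List Int)) : List (Int × Int) :=
  (PySem.List.pyRange 0 (matrice.length : Int) 1).flatMap (fun i =>
    (PySem.List.pyRange 0 ((PySem.List.pyGetD matrice 0 []).length : Int) 1).map (fun j => (i, j)))

-- A's loop body, with the coordinate pair abstracted
def pvStepA (matrice : List (List Int)) (interdits : Option (List (Int × Int)))
    (st : Option Int × List (Int × Int)) (c : Int × Int) : Option Int × List (Int × Int) :=
  let (val_max, liste_coord) := st
  match val_max with
  | none =>
    if (match interdits with | none => true | some s => !(s.contains c)) then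
      (some (get_val matrice c.1 c.2), [c])
    else st
  | some m =>
    if m < get_val matrice c.1 c.2 then
      if (match interdits with | none => true | some s => !(s.contains c)) then
        (some (get_val matrice c.1 c.2), [c])
      else st
    else if get_val matrice c.1 c.2 = m then
      if (match interdits with | none => true | some s => !(s.contains c)) then
        (val_max, liste_coord ++ [c])
      else st
    else st

-- A's update on an allowed cell
def pvG (matrice : List (List Int)) (st : Option Int × List (Int × Int)) (c : Int × Int) :
    Option Int × List (Int × Int) :=
  match st.1 with
  | none => (some (get_val matrice c.1 c.2), [c])
  | some m =>
    if m < get_val matrice c.1 c.2 then (some (get_val matrice c.1 c.2), [c])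
    else if get_val matrice c.1 c.2 = m then (st.1, st.2 ++ [c])
    else st

def pvMx (matrice : List (List Int)) (c : Int × Int) (cs : List (Int × Int)) : Int :=
  cs.foldl (fun acc d => max acc (get_val matrice d.1 d.2)) (get_val matrice c.1 c.2)

def pvSel (matrice : List (List Int)) (c : Int × Int) (cs : List (Int × Int)) : List (Int × Int) :=
  (c :: cs).filter (fun d => get_val matrice d.1 d.2 == pvMx matrice c cs)

def pvSelOf (matrice : List (List Int)) (l : List (Int × Int)) : List (Int × Int) :=
  match l with
  | [] => []
  | c :: cs => pvSel matrice c cs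

theorem pvFoldNested {a : Type} (f : a → Int × Int → a) (rows cols : List Int) (init : a) :
    rows.foldl (fun s i => cols.foldl (fun s j => f s (i, j)) s) init
      = (rows.flatMap (fun i => cols.map (fun j => (i, j)))).foldl f init := by
  induction rows generalizing init with
  | nil => rfl
  | cons i rs ih => simp only [List.flatMap_cons, List.foldl_append, List.foldl_cons,
      List.foldl_map, ih]

theorem pvFilterFlatMap {a b : Type} (l : List a) (g : a → List b) (p : b → Bool) :
    l.flatMap (fun x => (g x).filter p) = (l.flatMap g).filter p := by
  induction l with
  | nil => rfl
  | cons x xs ih => simp only [List.flatMap_cons, List.filter_append, ih]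

theorem portA_eq (matrice : List (List Int)) (interdits : Option (List (Int × Int))) :
    max_matrice matrice interdits
      = ((pvCells matrice).foldl (pvStepA matrice interdits) (none, [])).2 := by
  show ((PySem.List.pyRange 0 (get_nb_lignes matrice) 1).foldl
      (fun st i => (PySem.List.pyRange 0 (get_nb_colonnes matrice) 1).foldl
        (fun st j => pvStepA matrice interdits st (i, j)) st)
      ((none : Option Int), ([] : List (Int × Int)))).2 = _
  rw [pvFoldNested]
  rfl

theorem stepA_eq (matrice : List (List Int)) (interdits : Option (List (Int × Int)))
    (st : Option Int × List (Int × Int)) (c : Int × Int) :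
    pvStepA matrice interdits st c
      = if pvAllow interdits c then pvG matrice st c else st := by
  rcases st with ⟨vm, lc⟩
  cases vm <;> simp only [pvStepA, pvG, pvAllow] <;> split_ifs <;> rfl

theorem coords_eq (matrice : List (List Int)) (interdits : Option (List (Int × Int))) :
    ((PySem.List.pyRange 0 (matrice.length : Int) 1).flatMap (fun i =>
      ((PySem.List.pyRange 0 ((PySem.List.pyGetD matrice 0 []).length : Int) 1).map
          (fun j => (i, j))).filter
        (fun c => match interdits with | none => true | some s => !(s.contains c))))
      = (pvCells matrice).filter (pvAllow interdits) := by
  unfold pvCells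
  rw [← pvFilterFlatMap]
  rfl

theorem portB_eq (matrice : List (List Int)) (interdits : Option (List (Int × Int))) :
    max_matrice_alt matrice interdits
      = pvSelOf matrice ((pvCells matrice).filter (pvAllow interdits)) := by
  unfold max_matrice_alt
  rw [coords_eq]
  rfl

theorem pvMx_append (matrice : List (List Int)) (c r : Int × Int) (cs : List (Int × Int)) :
    pvMx matrice c (cs ++ [r]) = max (pvMx matrice c cs) (get_val matrice r.1 r.2) := by
  simp [pvMx, List.foldl_append]

theorem pvLe (matrice : List (List Int)) (c : Int × Int) (cs : List (Int × Int)) :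
    ∀ x ∈ c :: cs, get_val matrice x.1 x.2 ≤ pvMx matrice c cs := by
  intro x hx
  have h := PySem.List.le_foldl_max_int cs (fun d => get_val matrice d.1 d.2)
    (get_val matrice c.1 c.2)
  rcases List.mem_cons.mp hx with h1 | h1
  · subst h1; exact h.1
  · exact h.2 x h1

theorem pvG_step (matrice : List (List Int)) (c r : Int × Int) (cs : List (Int × Int)) :
    pvG matrice (some (pvMx matrice c cs), pvSel matrice c cs) r
      = (some (pvMx matrice c (cs ++ [r])), pvSel matrice c (cs ++ [r])) := by
  by_cases h1 : pvMx matrice c cs < get_val matrice r.1 r.2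
  · have hmax : pvMx matrice c (cs ++ [r]) = get_val matrice r.1 r.2 := by
      rw [pvMx_append]; omega
    have hnil : (c :: cs).filter
        (fun d => get_val matrice d.1 d.2 == get_val matrice r.1 r.2) = [] := by
      rw [List.filter_eq_nil_iff]
      intro x hx
      have := pvLe matrice c cs x hx
      simp only [beq_iff_eq]
      omega
    simp only [pvG, h1, if_pos]
    simp only [pvSel, hmax]
    rw [← List.cons_append, List.filter_append, hnil]
    simp
  · by_cases h2 : get_val matrice r.1 r.2 = pvMx matrice c cs
    · have hmax : pvMx matrice c (cs ++ [r]) = pvMx matrice c cs := by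
        rw [pvMx_append]; omega
      simp only [pvG, if_neg h1, if_pos h2]
      simp only [pvSel, hmax]
      rw [← List.cons_append, List.filter_append]
      simp [h2]
    · have hmax : pvMx matrice c (cs ++ [r]) = pvMx matrice c cs := by
        rw [pvMx_append]; omega
      simp only [pvG, if_neg h1, if_neg h2]
      simp only [pvSel, hmax]
      rw [← List.cons_append, List.filter_append]
      simp [h2]

theorem pvAux (matrice : List (List Int)) (rest : List (Int × Int)) :
    ∀ (c : Int × Int) (cs : List (Int × Int)),
      rest.foldl (pvG matrice) (some (pvMx matrice c cs), pvSel matrice c cs)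
        = (some (pvMx matrice c (cs ++ rest)), pvSel matrice c (cs ++ rest)) := by
  induction rest with
  | nil => intro c cs; simp
  | cons r rest ih =>
    intro c cs
    rw [List.foldl_cons, pvG_step, ih c (cs ++ [r])]
    simp

theorem pvCoreL (matrice : List (List Int)) (l : List (Int × Int)) :
    (l.foldl (pvG matrice) (none, [])).2 = pvSelOf matrice l := by
  cases l with
  | nil => rfl
  | cons c cs =>
    rw [List.foldl_cons]
    have h0 : pvG matrice ((none : Option Int), ([] : List (Int × Int))) c
        = (some (pvMx matrice c []), pvSel matrice c []) := by
      simp [pvG, pvMx, pvSel]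
    rw [h0, pvAux matrice cs c []]
    rfl

-- ===== VERDICT (by name: the statement is the Claim_ definition above) =====
theorem max_matrice_spec : Claim_equal_max_matrice := by
  intro matrice interdits _ _
  unfold Spec_max_matrice
  rw [portA_eq, portB_eq]
  have hfun : pvStepA matrice interdits
      = fun st c => if pvAllow interdits c then pvG matrice st c else st := by
    funext st c; exact stepA_eq matrice interdits st c
  rw [hfun, PySem.List.foldl_if_eq_foldl_filter, pvCoreL]
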